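-- pv_equiv track=rewrite | github.com/Ginko-san/Progra-Interprete | Logic.py | loop_lines
-- ===== SOURCE A (Python) =====
-- def loop_lines(cod_list, list_x):
--     trad_list = []
--     for x in cod_list:
--         t = translate_line(x, list_x)
--         if t == False:
--             trad_list.append(x)
--         else:
--             trad_list.append(t)
--     return trad_list
--
-- def translate_line(SGL_line, list_x):
--     trad_line = SGL_line
--     for y in list_x:
--         d, amount = search(SGL_line, y[0])
--         if d:
--             trad_line = trad_line.replace(y[0], y[1], amount)
--     if trad_line != SGL_line:
--         return trad_line
--     return False
--
-- def search(cad, dat):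
--     listax = cad.split(" ")
--     for x in listax:
--         y, amount = find_bool(x, dat)
--         if x == dat:
--             return True, 1
--         elif y:
--             return True, amount
--     return False, 0
--
-- def find_bool(var, dat):
--     x = var.find(dat)
--     pos = []
--     while x >= 0:
--         pos.append(x)
--         var = var.replace(dat, "", 1)
--         x = var.find(dat)
--     if len(pos) > 0:
--         return True, len(pos)
--     return False, 0
-- ===== SOURCE B (Python) =====
-- # B: stack-based occurrence counting (one scan per token, replicating A's
-- # repeated-leftmost-removal counts including merges), tokens split once per line.
-- def _stack_count(tok, pat):
--     m = len(pat)
--     pl = list(pat)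
--     st = []
--     cnt = 0
--     for ch in tok:
--         st.append(ch)
--         if len(st) >= m and st[-m:] == pl:
--             del st[-m:]
--             cnt += 1
--     return cnt
--
-- def _translate(line, tokens, list_x):
--     trad = line
--     for pair in list_x:
--         pat, rep = pair[0], pair[1]
--         amount = next((_stack_count(t, pat) for t in tokens if pat in t), 0)
--         if amount:
--             trad = trad.replace(pat, rep, amount)
--     return trad
--
-- def loop_lines(cod_list, list_x):
--     return [_translate(line, line.split(" "), list_x) for line in cod_list]
-- ===== Notes on version B (the rewrite author's own statement) =====
-- stated objective: alternative
-- what changed: A counts occurrences per token by repeatedly find-ing and removing the leftmost match, rebuilding the string each time inside a per-token helper chain; B counts in one stack scan per token (push each char, pop and count when the stack ends with the pattern), splits each line into tokens once, and maps a comprehension over the lines.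
-- outside the precondition, e.g. on loop_lines(['abc'], [['zz']]): A returns ['abc'], B raises IndexError
import Mathlib
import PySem

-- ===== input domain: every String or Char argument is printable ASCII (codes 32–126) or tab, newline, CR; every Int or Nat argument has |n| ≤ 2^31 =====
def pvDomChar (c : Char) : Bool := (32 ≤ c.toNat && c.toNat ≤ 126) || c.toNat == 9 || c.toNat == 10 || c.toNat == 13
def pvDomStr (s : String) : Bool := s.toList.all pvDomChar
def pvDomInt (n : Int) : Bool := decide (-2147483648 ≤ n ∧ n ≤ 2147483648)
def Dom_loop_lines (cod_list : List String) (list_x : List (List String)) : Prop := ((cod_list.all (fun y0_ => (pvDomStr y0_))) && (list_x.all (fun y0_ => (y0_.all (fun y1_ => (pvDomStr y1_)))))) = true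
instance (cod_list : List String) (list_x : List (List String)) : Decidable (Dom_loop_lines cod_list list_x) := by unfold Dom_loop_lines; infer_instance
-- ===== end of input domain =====

-- B counts pattern occurrences with a stack scan per token instead of A's repeated
-- find-and-remove string rebuilding (find_bool); the two counts are proved equal below.

-- ===== PORT A =====

-- hand port of Python's  s.replace(old, new, n)  (n leftmost non-overlapping occurrences);
-- exact for old ≠ [] (Pre_ guarantees A only reaches replace with a non-empty pattern)
def pyReplaceN (s old new : List Char) (n : Nat) : List Char :=
  match n with
  | 0 => s
  | n + 1 =>
    let i := PySem.Chars.find s old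
    if i < 0 then s
    else s.take i.toNat ++ new ++ pyReplaceN (s.drop (i.toNat + old.length)) old new n

-- the while-loop of find_bool: pos accumulates the found indices; fuel var.length + 1 is
-- enough for every non-empty dat (each removal shortens var by dat.length ≥ 1)
def findBoolAux (fuel : Nat) (var dat : List Char) (pos : List Int) : List Int :=
  match fuel with
  | 0 => pos
  | fuel + 1 =>
    let x := PySem.Chars.find var dat
    if 0 ≤ x then findBoolAux fuel (pyReplaceN var dat [] 1) dat (pos ++ [x]) else pos

def find_bool (var dat : List Char) : Bool × Nat :=
  let pos := findBoolAux (var.length + 1) var dat []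
  if 0 < pos.length then (true, pos.length) else (false, 0)

def searchA (listax : List (List Char)) (dat : List Char) : Bool × Nat :=
  match listax with
  | [] => (false, 0)
  | x :: rest =>
    let ya := find_bool x dat
    if x = dat then (true, 1)
    else if ya.1 then (true, ya.2)
    else searchA rest dat

def search (cad dat : List Char) : Bool × Nat :=
  searchA (PySem.Chars.splitOn cad [' ']) dat

-- y[0] / y[1]: Python raises IndexError on a too-short y; Pre_ excludes that, the default "" here is never read inside Pre_
def translate_line (SGL_line : List Char) (list_x : List (List String)) : Option (List Char) :=
  let trad := list_x.foldl (fun trad y =>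
    let pat := (PySem.List.pyGetD y 0 "").toList
    let rep := (PySem.List.pyGetD y 1 "").toList
    let da := search SGL_line pat
    if da.1 then pyReplaceN trad pat rep da.2 else trad) SGL_line
  if trad ≠ SGL_line then some trad else none

def loop_lines (cod_list : List String) (list_x : List (List String)) : List String :=
  cod_list.foldl (fun trad_list x =>
    trad_list ++ [match translate_line x.toList list_x with
                  | none => x          -- translate_line returned False
                  | some t => String.ofList t]) []

-- ===== PORT B =====

-- one stack step: push c, pop (and count) when the stack now ends with dat
def stackStep (dat : List Char) (sn : List Char × Nat) (c : Char) : List Char × Nat :=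
  let st := sn.1 ++ [c]
  if dat.isSuffixOf st then (st.take (st.length - dat.length), sn.2 + 1) else (st, sn.2)

def stackCount (tok dat : List Char) : Nat :=
  (tok.foldl (stackStep dat) ([], 0)).2

-- next((... for t in tokens if pat in t), 0)
def firstAmount (tokens : List (List Char)) (pat : List Char) : Nat :=
  match tokens with
  | [] => 0
  | t :: ts => if PySem.Chars.isIn pat t then stackCount t pat else firstAmount ts pat

def translateB (line : List Char) (tokens : List (List Char)) (list_x : List (List String)) : List Char :=
  list_x.foldl (fun trad y =>
    let pat := (PySem.List.pyGetD y 0 "").toList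
    let rep := (PySem.List.pyGetD y 1 "").toList
    let amount := firstAmount tokens pat
    if amount ≠ 0 then pyReplaceN trad pat rep amount else trad) line

def loop_lines_alt (cod_list : List String) (list_x : List (List String)) : List String :=
  cod_list.map (fun line =>
    String.ofList (translateB line.toList (PySem.Chars.splitOn line.toList [' ']) list_x))

-- ===== PRECONDITION & SPEC =====
-- Pre_ excludes (unless cod_list is empty, where no pair is ever read): pairs with an empty
-- first entry, on which A loops forever (find_bool never terminates for dat = ""), and pairs
-- shorter than 2 entries, on which A raises IndexError whenever the pattern matches and only
-- accidentally returns when it never matches (B reads both fields of every pair up front).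
def Pre_loop_lines (cod_list : List String) (list_x : List (List String)) : Prop :=
  cod_list = [] ∨ ∀ y ∈ list_x, 2 ≤ y.length ∧ y.headD "" ≠ ""
instance (cod_list : List String) (list_x : List (List String)) : Decidable (Pre_loop_lines cod_list list_x) := by unfold Pre_loop_lines; infer_instance

def pvWitness_loop_lines : List String × List (List String) :=
  (["aabb cd cd", "nothing here"], [["ab", "X"], ["cd", "Y"]])

def Spec_loop_lines (cod_list : List String) (list_x : List (List String)) (out : List String) : Prop := out = loop_lines_alt cod_list list_x
instance (cod_list : List String) (list_x : List (List String)) (out : List String) : Decidable (Spec_loop_lines cod_list list_x out) := by unfold Spec_loop_lines; infer_instance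

-- ===== CLAIM (what is proved, stated in full; the proofs are below) =====
def Claim_equal_loop_lines : Prop := ∀ (cod_list : List String) (list_x : List (List String)), Dom_loop_lines cod_list list_x → Pre_loop_lines cod_list list_x → Spec_loop_lines cod_list list_x (loop_lines cod_list list_x)

-- ===== LEMMAS AND PROOFS =====

-- the count component of the stack fold is a running total: the start value only shifts it
theorem stackFold_shift (dat : List Char) (s : List Char) (st : List Char) (n : Nat) :
    s.foldl (stackStep dat) (st, n) =
      ((s.foldl (stackStep dat) (st, 0)).1, n + (s.foldl (stackStep dat) (st, 0)).2) := by
  induction s generalizing st n with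
  | nil => simp
  | cons c s ih =>
    simp only [List.foldl_cons, stackStep]
    split
    · rw [ih _ (n + 1), ih _ 1]
      simp [Nat.add_assoc]
    · rw [ih _ n]

-- if no nonempty prefix of s extends st to a string ending with dat, the fold just pushes s
theorem stackFold_noPop (dat : List Char) (s : List Char) (st : List Char) (n : Nat)
    (h : ∀ k, 1 ≤ k → k ≤ s.length → ¬ dat <:+ st ++ s.take k) :
    s.foldl (stackStep dat) (st, n) = (st ++ s, n) := by
  induction s generalizing st with
  | nil => simp
  | cons c s ih =>
    simp only [List.foldl_cons, stackStep]
    have h1 : ¬ dat <:+ st ++ [c] := by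
      have := h 1 (by omega) (by simp)
      simpa using this
    rw [if_neg (by simpa [List.isSuffixOf_iff_suffix] using h1)]
    rw [ih (st ++ [c]) (by
      intro k hk1 hk2
      have := h (k + 1) (by omega) (by simp; omega)
      simpa [List.append_assoc] using this)]
    simp

-- processing p ++ dat whose only occurrence of dat is at the very end pops exactly once
theorem stackFold_popEnd (dat p : List Char) (hdat : dat ≠ [])
    (h : ∀ k, 1 ≤ k → k < (p ++ dat).length → ¬ dat <:+ (p ++ dat).take k) :
    (p ++ dat).foldl (stackStep dat) ([], 0) = (p, 1) := by
  have hd1 : 1 ≤ dat.length := List.length_pos_of_ne_nil hdat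
  have hc : p ++ dat = (p ++ dat.dropLast) ++ [dat.getLast hdat] := by
    rw [List.append_assoc, List.dropLast_concat_getLast hdat]
  have hnp : ∀ k, 1 ≤ k → k ≤ (p ++ dat.dropLast).length →
      ¬ dat <:+ [] ++ (p ++ dat.dropLast).take k := by
    intro k hk1 hk2
    have hkl : k ≤ p.length + (dat.length - 1) := by simpa using hk2
    have htk : ((p ++ dat.dropLast) ++ [dat.getLast hdat]).take k = (p ++ dat.dropLast).take k :=
      List.take_append_of_le_length hk2
    have := h k hk1 (by simp; omega)
    rw [hc, htk] at this
    simpa using this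
  rw [hc, List.foldl_append, stackFold_noPop dat (p ++ dat.dropLast) [] 0 hnp]
  simp only [List.foldl_cons, List.foldl_nil, stackStep, List.nil_append]
  rw [← hc]
  rw [if_pos (by simp [List.isSuffixOf_iff_suffix])]
  rw [show (p ++ dat).length - dat.length = p.length by simp]
  rw [List.take_left]

theorem suffix_take_drop (dat var : List Char) (k : Nat) (hk : k ≤ var.length)
    (h : dat <:+ var.take k) : dat.length ≤ k ∧ dat <+: var.drop (k - dat.length) := by
  obtain ⟨u, hu⟩ := h
  have hlen : u.length + dat.length = k := by
    have := congrArg List.length hu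
    simpa [Nat.min_eq_left hk] using this
  constructor
  · omega
  · have hvar : var = u ++ (dat ++ var.drop k) := by
      conv_lhs => rw [← List.take_append_drop k var]
      rw [← hu, List.append_assoc]
    have : var.drop u.length = dat ++ var.drop k := by
      conv_lhs => rw [hvar]
      exact List.drop_left
    rw [show k - dat.length = u.length by omega, this]
    exact List.prefix_append dat _

-- removing the leftmost occurrence lowers the stack count by exactly one
theorem stackCount_removal (dat var : List Char) (hdat : dat ≠ [])
    (hfind : 0 ≤ PySem.Chars.find var dat) :
    stackCount var dat =
      stackCount (var.take (PySem.Chars.find var dat).toNat ++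
                  var.drop ((PySem.Chars.find var dat).toNat + dat.length)) dat + 1 := by
  have hd1 : 1 ≤ dat.length := List.length_pos_of_ne_nil hdat
  set i := (PySem.Chars.find var dat).toNat with hi
  obtain ⟨hpref, hleft⟩ := PySem.Chars.find_spec hfind
  have hdl : dat.length ≤ var.length - i := by
    have := hpref.length_le
    simpa using this
  have hile : i + dat.length ≤ var.length := by
    rcases Nat.lt_or_ge i var.length with h' | h'
    · omega
    · exfalso
      have : var.drop i = [] := List.drop_eq_nil_of_le h'
      rw [this] at hpref
      exact hdat (List.prefix_nil.mp hpref)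
  set p := var.take i with hp
  set r := var.drop (i + dat.length) with hr
  have hdrop : var.drop i = dat ++ r := by
    obtain ⟨t, ht⟩ := hpref
    have : t = r := by
      have := congrArg (List.drop dat.length) ht
      rw [List.drop_left] at this
      rw [this, hr, List.drop_drop, Nat.add_comm]
    rw [← ht, this]
  have hvar : var = (p ++ dat) ++ r := by
    rw [List.append_assoc, hp, ← hdrop, List.take_append_drop]
  have hlp : p.length = i := by simp [hp]; omega
  -- no occurrence of dat ends strictly before i + dat.length
  have hno : ∀ k, 1 ≤ k → k < i + dat.length → ¬ dat <:+ var.take k := by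
    intro k hk1 hk2 hsuf
    have hkle : k ≤ var.length := by omega
    obtain ⟨hdk, hpre2⟩ := suffix_take_drop dat var k hkle hsuf
    exact hleft (k - dat.length) (by omega) hpre2
  have hpd : (p ++ dat).foldl (stackStep dat) ([], 0) = (p, 1) := by
    apply stackFold_popEnd dat p hdat
    intro k hk1 hk2
    have hlen2 : (p ++ dat).length = i + dat.length := by simp [hlp]
    have hth : (p ++ dat).take k = var.take k := by
      conv_rhs => rw [hvar]
      exact (List.take_append_of_le_length (by omega)).symm
    rw [hth]
    exact hno k hk1 (hlen2 ▸ hk2)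
  have hpp : p.foldl (stackStep dat) (([] : List Char), 0) = (p, 0) := by
    have := stackFold_noPop dat p [] 0 (by
      intro k hk1 hk2
      have : p.take k = var.take k := by
        rw [hp, List.take_take, Nat.min_eq_left (by simpa [hlp] using hk2)]
      rw [List.nil_append, this]
      exact hno k hk1 (by simp [hlp] at hk2; omega))
    simpa using this
  unfold stackCount
  conv_lhs => rw [hvar]
  rw [List.foldl_append, hpd, stackFold_shift]
  conv_rhs => rw [List.foldl_append, hpp]
  omega

theorem stackCount_of_not_infix (dat var : List Char) (h : ¬ dat <:+: var) :
    stackCount var dat = 0 := by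
  unfold stackCount
  rw [stackFold_noPop dat var [] 0 (by
    intro k hk1 hk2 hsuf
    rw [List.nil_append] at hsuf
    exact h (hsuf.isInfix.trans (List.take_prefix k var).isInfix))]

-- A's repeated-removal count equals B's stack count
theorem findBoolAux_length (dat : List Char) (hdat : dat ≠ []) :
    ∀ (fuel : Nat) (var : List Char) (pos : List Int), var.length < fuel →
      (findBoolAux fuel var dat pos).length = pos.length + stackCount var dat := by
  have hd1 : 1 ≤ dat.length := List.length_pos_of_ne_nil hdat
  intro fuel
  induction fuel with
  | zero => intro var pos h; omega
  | succ f ih =>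
    intro var pos h
    by_cases hf : 0 ≤ PySem.Chars.find var dat
    · have hinf : dat <:+: var := (PySem.Chars.find_nonneg_iff var dat).mp hf
      have hrepl : pyReplaceN var dat [] 1 =
          var.take (PySem.Chars.find var dat).toNat ++
          var.drop ((PySem.Chars.find var dat).toNat + dat.length) := by
        simp [pyReplaceN, not_lt.mpr hf]
      obtain ⟨hpref, -⟩ := PySem.Chars.find_spec hf
      have hdl : dat.length ≤ var.length - (PySem.Chars.find var dat).toNat := by
        have := hpref.length_le
        simpa using this
      have hlen' : (pyReplaceN var dat [] 1).length < var.length := by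
        rw [hrepl]
        have := hinf.length_le
        simp only [List.length_append, List.length_take, List.length_drop]
        omega
      simp only [findBoolAux, if_pos hf]
      rw [ih _ _ (by omega), hrepl]
      rw [stackCount_removal dat var hdat hf]
      simp
      omega
    · have hninf : ¬ dat <:+: var := fun hc => hf ((PySem.Chars.find_nonneg_iff var dat).mpr hc)
      simp only [findBoolAux, if_neg hf]
      rw [stackCount_of_not_infix dat var hninf]
      omega

theorem find_bool_eq (dat x : List Char) (hdat : dat ≠ []) :
    find_bool x dat = (decide (stackCount x dat ≠ 0), stackCount x dat) := by
  unfold find_bool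
  simp only []
  rw [findBoolAux_length dat hdat (x.length + 1) x [] (by omega)]
  simp only [List.length_nil, Nat.zero_add]
  rcases Nat.eq_zero_or_pos (stackCount x dat) with h0 | h0
  · simp [h0]
  · rw [if_pos h0]
    simp
    omega

theorem stackCount_ne_zero_iff (dat x : List Char) (hdat : dat ≠ []) :
    stackCount x dat ≠ 0 ↔ dat <:+: x := by
  constructor
  · intro h
    by_contra hninf
    exact h (stackCount_of_not_infix dat x hninf)
  · intro hinf
    have hf : 0 ≤ PySem.Chars.find x dat := (PySem.Chars.find_nonneg_iff x dat).mpr hinf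
    rw [stackCount_removal dat x hdat hf]
    omega

theorem stackCount_self (dat : List Char) (hdat : dat ≠ []) : stackCount dat dat = 1 := by
  have hf : 0 ≤ PySem.Chars.find dat dat :=
    (PySem.Chars.find_nonneg_iff dat dat).mpr (List.infix_refl dat)
  have h0 : (PySem.Chars.find dat dat).toNat = 0 := by
    by_contra hne
    obtain ⟨-, hleft⟩ := PySem.Chars.find_spec hf
    exact hleft 0 (by omega) (by simp)
  rw [stackCount_removal dat dat hdat hf, h0]
  simp [stackCount]

theorem searchA_eq (dat : List Char) (hdat : dat ≠ []) (toks : List (List Char)) :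
    searchA toks dat = (decide (firstAmount toks dat ≠ 0), firstAmount toks dat) := by
  induction toks with
  | nil => simp [searchA, firstAmount]
  | cons x ts ih =>
    simp only [searchA, firstAmount, find_bool_eq dat x hdat]
    by_cases hx : x = dat
    · subst hx
      have h1 : PySem.Chars.isIn x x = true := (PySem.Chars.isIn_iff_infix x x).mpr (List.infix_refl x)
      simp [h1, stackCount_self x hdat]
    · rw [if_neg hx]
      by_cases hin : dat <:+: x
      · have h1 : PySem.Chars.isIn dat x = true := (PySem.Chars.isIn_iff_infix dat x).mpr hin
        have hsc : stackCount x dat ≠ 0 := (stackCount_ne_zero_iff dat x hdat).mpr hin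
        simp [h1, hsc]
      · have h1 : PySem.Chars.isIn dat x = false :=
          (PySem.Chars.isIn_eq_false_iff dat x).mpr hin
        have hsc : stackCount x dat = 0 := stackCount_of_not_infix dat x hin
        simpa [h1, hsc] using ih

theorem translate_eq (line : List Char) (list_x : List (List String))
    (hpre : ∀ y ∈ list_x, 2 ≤ y.length ∧ y.headD "" ≠ "") :
    (translate_line line list_x).getD line =
      translateB line (PySem.Chars.splitOn line [' ']) list_x := by
  unfold translate_line translateB
  have hfold : list_x.foldl (fun trad y =>
      let pat := (PySem.List.pyGetD y 0 "").toList
      let rep := (PySem.List.pyGetD y 1 "").toList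
      let da := search line pat
      if da.1 then pyReplaceN trad pat rep da.2 else trad) line =
    list_x.foldl (fun trad y =>
      let pat := (PySem.List.pyGetD y 0 "").toList
      let rep := (PySem.List.pyGetD y 1 "").toList
      let amount := firstAmount (PySem.Chars.splitOn line [' ']) pat
      if amount ≠ 0 then pyReplaceN trad pat rep amount else trad) line := by
    apply PySem.List.foldl_congr_mem
    intro acc y hy
    obtain ⟨hlen, hhead⟩ := hpre y hy
    have hpat : (PySem.List.pyGetD y 0 "").toList ≠ [] := by
      cases y with
      | nil => simp at hlen
      | cons a l =>
        simp only [List.headD_cons] at hhead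
        have : PySem.List.pyGetD (a :: l) 0 "" = a := by
          simp [PySem.List.pyGetD]
        rw [this]
        intro hl
        apply hhead
        have := congrArg String.ofList hl
        simpa [String.ofList_toList] using this
    simp only [search, searchA_eq _ hpat]
    by_cases hfa : firstAmount (PySem.Chars.splitOn line [' ']) (PySem.List.pyGetD y 0 "").toList = 0
    · simp [hfa]
    · simp [hfa]
  rw [hfold]
  have key : ∀ (t l : List Char), (if t ≠ l then some t else none).getD l = t := by
    intro t l
    split_ifs with h
    · rfl
    · simp [not_not.mp h]
  exact key _ line

-- ===== VERDICT (by name: the statement is the Claim_ definition above) =====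
theorem loop_lines_spec : Claim_equal_loop_lines := by
  intro cod_list list_x hdom hpre
  unfold Spec_loop_lines
  rcases hpre with h | h
  · subst h; rfl
  · unfold loop_lines loop_lines_alt
    rw [PySem.List.foldl_append_singleton_eq_map]
    simp only [List.nil_append]
    apply List.map_congr_left
    intro line hline
    have ht := translate_eq line.toList list_x h
    cases hopt : translate_line line.toList list_x with
    | none =>
      rw [hopt, Option.getD_none] at ht
      rw [← ht, String.ofList_toList]
    | some t =>
      rw [hopt, Option.getD_some] at ht
      rw [← ht]
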